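-- pv_equiv track=rewrite | github.com/JWock82/ipycalc | ipycalc/calc.py | process_if
-- ===== SOURCE A (Python) =====
-- def process_if(text, type):
--
--     # Note: `if` statements nested in the first return value are not supported. `if` statements nested after the first 'else' are supported.
--
--     # Split the line into `if` and `else` portions
--     if 'else' in text:
--         if_text, else_text = text.split('else', 1)
--     else:
--         if_text, else_text = text, ''
--
--     # Check what type of statement this is: `if`, `elif`, or `else`
--     if type == 'if':
--         # Add an `if` line
--         value, condition = if_text.split('if', 1)
--         latex_text = value + '\\hspace{0.5em}\\textsf{~if~}' + condition + '\\\\'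
--     elif type == 'elif':
--         # Add an `elsif` line
--         value, condition = if_text.split('if', 1)
--         latex_text = '\\textsf{else~}' + value + '\\hspace{0.5em}\\textsf{~if~}' + condition + '\\\\'
--     elif type == 'else':
--         value = if_text
--         # Add the `else` line
--         latex_text = '\\textsf{else~}' + value + '\\\\'
--
--     # Repeat the process for any further conditionals found in the `else` portion of the statement
--     if else_text != '':
--
--         # Remove any whitespace at the ends of the else text
--         else_text = else_text.strip()
--
--         # Use recursion to evaluate the remaining conditional statements
--         if '~if~' in else_text:
--             latex_text += process_if(else_text, type='elif')
--         else:
--             latex_text += process_if(else_text, type='else')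
--
--     return latex_text
-- ===== SOURCE B (Python) =====
-- def process_if(text, type):
--     # Iterative pipeline: str.partition extracts each segment, the else-prefix comes
--     # from a lookup table, and the collected pieces are ''.join-ed at the end.
--     ELSE_TAG = '\\textsf{else~}'
--     PREFIX = {'if': '', 'elif': ELSE_TAG}
--     pieces = []
--     while True:
--         if_part, _, rest = text.partition('else')
--         if type == 'else':
--             pieces.append(ELSE_TAG + if_part + '\\\\')
--         else:
--             value, condition = if_part.split('if', 1)
--             pieces.append(PREFIX[type] + value + '\\hspace{0.5em}\\textsf{~if~}' + condition + '\\\\')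
--         if rest == '':
--             return ''.join(pieces)
--         text = rest.strip()
--         type = 'elif' if '~if~' in text else 'else'
-- ===== Notes on version B (the rewrite author's own statement) =====
-- stated objective: idiomatic
-- what changed: A's split-then-recurse with three separate formatting branches becomes an iterative pipeline: str.partition extracts each segment, a prefix lookup table replaces the duplicated if/elif formatting branches, and the collected pieces are ''.join-ed at the end.
import Mathlib
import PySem

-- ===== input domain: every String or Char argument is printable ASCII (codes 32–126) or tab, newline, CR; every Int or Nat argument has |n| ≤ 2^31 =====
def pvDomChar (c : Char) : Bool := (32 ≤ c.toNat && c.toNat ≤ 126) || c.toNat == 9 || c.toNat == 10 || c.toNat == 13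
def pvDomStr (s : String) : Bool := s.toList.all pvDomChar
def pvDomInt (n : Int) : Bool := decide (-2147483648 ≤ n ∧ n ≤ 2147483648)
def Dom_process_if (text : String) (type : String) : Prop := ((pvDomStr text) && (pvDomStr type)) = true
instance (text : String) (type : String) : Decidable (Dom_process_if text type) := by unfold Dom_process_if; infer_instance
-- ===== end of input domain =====

-- B replaces A's split-and-recurse (three formatting branches) with an iterative
-- str.partition pipeline: a prefix table and one formatting path, pieces joined at the end.
-- ===== PORT A =====

lemma pvFindGo (sub l : List Char) (k : ℕ) :
    PySem.Chars.find.go sub l k =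
      if PySem.Chars.find l sub = -1 then -1 else PySem.Chars.find l sub + k := by
  induction l generalizing k with
  | nil =>
      simp only [PySem.Chars.find.go, PySem.Chars.find]
      split <;> simp
  | cons c rest ih =>
      rw [PySem.Chars.find.go]
      rw [show PySem.Chars.find (c :: rest) sub = PySem.Chars.find.go sub (c :: rest) 0 from rfl]
      rw [PySem.Chars.find.go]
      by_cases hp : sub.isPrefixOf (c :: rest) = true
      · simp [hp]
      · simp only [hp, Bool.false_eq_true, if_false, ih (k+1), ih 1]
        by_cases hr : PySem.Chars.find rest sub = -1
        · simp [hr]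
        · have h1 := PySem.Chars.neg_one_le_find rest sub
          rw [if_neg hr, if_neg hr, if_neg (by omega)]
          push_cast; ring

lemma pvFindCons (sub : List Char) (c : Char) (rest : List Char) :
    PySem.Chars.find (c :: rest) sub =
      if sub.isPrefixOf (c :: rest) = true then 0
      else if PySem.Chars.find rest sub = -1 then -1 else PySem.Chars.find rest sub + 1 := by
  rw [show PySem.Chars.find (c :: rest) sub = PySem.Chars.find.go sub (c :: rest) 0 from rfl]
  rw [PySem.Chars.find.go]
  by_cases hp : sub.isPrefixOf (c :: rest) = true
  · simp [hp]
  · simp [hp, pvFindGo]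

lemma pvGoZero (sep : List Char) (fuel : ℕ) (l cur : List Char) (acc : List (List Char)) :
    PySem.Chars.splitOnMax.go sep fuel 0 l cur acc = acc.reverse ++ [cur.reverse ++ l] := by
  cases fuel with
  | zero => rw [PySem.Chars.splitOnMax.go]; simp
  | succ fuel' =>
      cases l with
      | nil => rw [PySem.Chars.splitOnMax.go]; simp; omega
      | cons c rest => rw [PySem.Chars.splitOnMax.go]; simp

lemma pvGoOne (sep : List Char) (hs : sep ≠ []) :
    ∀ (fuel : ℕ) (l cur : List Char) (acc : List (List Char)), l.length < fuel →
    PySem.Chars.splitOnMax.go sep fuel 1 l cur acc =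
      if PySem.Chars.find l sep = -1 then acc.reverse ++ [cur.reverse ++ l]
      else acc.reverse ++ [cur.reverse ++ l.take (PySem.Chars.find l sep).toNat,
                           l.drop ((PySem.Chars.find l sep).toNat + sep.length)] := by
  intro fuel
  induction fuel with
  | zero => intro l cur acc h; omega
  | succ fuel' ih =>
      intro l cur acc h
      cases l with
      | nil =>
          rw [PySem.Chars.splitOnMax.go]
          have : PySem.Chars.find [] sep = -1 := by
            simp [PySem.Chars.find, PySem.Chars.find.go, List.isEmpty_iff, hs]
          simp [this]
          omega
      | cons c rest =>
          rw [PySem.Chars.splitOnMax.go]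
          simp only [show (1:ℕ) = 0 ↔ False by simp, if_false]
          by_cases hp : sep.isPrefixOf (c :: rest) = true
          · have hfind : PySem.Chars.find (c :: rest) sep = 0 := by
              rw [pvFindCons]; simp [hp]
            simp only [hp, if_true, hfind]
            rw [pvGoZero]
            simp
          · have hfind := pvFindCons sep c rest
            rw [if_neg hp] at hfind
            simp only [hp, Bool.false_eq_true, if_false]
            rw [ih rest (c :: cur) acc (by simp at h; omega)]
            by_cases hr : PySem.Chars.find rest sep = -1
            · simp [hfind, hr]
            · have h1 := PySem.Chars.neg_one_le_find rest sep
              rw [if_neg hr, hfind, if_neg hr, if_neg (by omega)]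
              have ht : (PySem.Chars.find rest sep + 1).toNat = (PySem.Chars.find rest sep).toNat + 1 := by omega
              simp only [ht, List.take_succ_cons, List.reverse_cons, List.append_assoc,
                List.cons_append, List.nil_append,
                show (PySem.Chars.find rest sep).toNat + 1 + sep.length
                   = ((PySem.Chars.find rest sep).toNat + sep.length) + 1 by omega,
                List.drop_succ_cons]

lemma pvSplitOnMaxOne (cs sep : List Char) (hs : sep ≠ []) :
    PySem.Chars.splitOnMax cs sep 1 =
      if PySem.Chars.find cs sep = -1 then [cs]
      else [cs.take (PySem.Chars.find cs sep).toNat,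
            cs.drop ((PySem.Chars.find cs sep).toNat + sep.length)] := by
  rw [PySem.Chars.splitOnMax]
  norm_num
  rw [pvGoOne sep hs _ cs [] [] (by omega)]
  split <;> simp

lemma pvStripLen (l : List Char) : (PySem.Chars.strip l).length ≤ l.length := by
  simp only [PySem.Chars.strip, PySem.Chars.rstrip, PySem.Chars.lstrip, List.length_reverse]
  calc (List.dropWhile PySem.Chars.isspace (List.dropWhile PySem.Chars.isspace l).reverse).length
      ≤ (List.dropWhile PySem.Chars.isspace l).reverse.length := List.length_dropWhile_le _ _
    _ ≤ l.length := by simpa using List.length_dropWhile_le PySem.Chars.isspace l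

def pvSplit1A (cs sep : List Char) : List Char × List Char :=
  -- A's `x, y = s.split(sep, 1)`; the fallback arm is Python's ValueError (excluded by Pre_)
  match PySem.Chars.splitOnMax cs sep 1 with
  | [a, b] => (a, b)
  | _ => (cs, [])

lemma pvDropStripLen (cs sep : List Char) (hs : sep ≠ [])
    (hf : PySem.Chars.find cs sep ≠ -1) :
    (PySem.Chars.strip (cs.drop ((PySem.Chars.find cs sep).toNat + sep.length))).length < cs.length := by
  have h1 := PySem.Chars.neg_one_le_find cs sep
  have h0 : 0 ≤ PySem.Chars.find cs sep := by omega
  have hlen : sep.length ≤ (cs.drop (PySem.Chars.find cs sep).toNat).length :=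
    (PySem.Chars.find_spec h0).1.length_le
  have hslen : 1 ≤ sep.length := by
    cases sep with
    | nil => exact absurd rfl hs
    | cons a b => simp
  have := pvStripLen (cs.drop ((PySem.Chars.find cs sep).toNat + sep.length))
  simp only [List.length_drop] at this hlen
  omega

def pvElsePair (cs : List Char) : List Char × List Char :=
  -- A's "if 'else' in text: ... split('else', 1) ... else: (text, '')"
  if PySem.Chars.isIn "else".toList cs then pvSplit1A cs "else".toList else (cs, [])

lemma pvTailLenA (cs : List Char) (h : (pvElsePair cs).2 ≠ []) :
    (PySem.Chars.strip (pvElsePair cs).2).length < cs.length := by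
  rw [pvElsePair] at h ⊢
  simp only [show "else".toList = ['e', 'l', 's', 'e'] from rfl] at h ⊢
  by_cases hi : PySem.Chars.isIn ['e', 'l', 's', 'e'] cs = true
  · rw [if_pos hi, pvSplit1A, pvSplitOnMaxOne cs _ (by decide)] at h ⊢
    by_cases hf : PySem.Chars.find cs ['e', 'l', 's', 'e'] = -1
    · simp [hf] at h
    · simp only [hf, if_false] at h ⊢
      simpa using pvDropStripLen cs ['e', 'l', 's', 'e'] (by decide) hf
  · simp only [Bool.not_eq_true] at hi
    simp [hi] at h

def processIfA (cs : List Char) (ty : String) : List Char :=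
  let p := pvElsePair cs
  let latex : List Char :=
    if ty = "if" then
      let vc := pvSplit1A p.1 "if".toList
      vc.1 ++ "\\hspace{0.5em}\\textsf{~if~}".toList ++ vc.2 ++ "\\\\".toList
    else if ty = "elif" then
      let vc := pvSplit1A p.1 "if".toList
      "\\textsf{else~}".toList ++ vc.1 ++ "\\hspace{0.5em}\\textsf{~if~}".toList ++ vc.2 ++ "\\\\".toList
    else if ty = "else" then
      "\\textsf{else~}".toList ++ p.1 ++ "\\\\".toList
    else []  -- Python raises UnboundLocalError here; such `type`s are outside Pre_
  if _h : p.2 ≠ [] then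
    let t := PySem.Chars.strip p.2
    latex ++ processIfA t (if PySem.Chars.isIn "~if~".toList t then "elif" else "else")
  else latex
termination_by cs.length
decreasing_by
  exact pvTailLenA cs _h

def process_if (text : String) (type : String) : String :=
  String.ofList (processIfA text.toList type)

-- ===== PORT B =====
def pvPartition (cs sep : List Char) : List Char × List Char × List Char :=
  -- hand port of Python's s.partition(sep): exact for sep ≠ '' (first occurrence, or (s,'',''))
  let i := PySem.Chars.find cs sep
  if i = -1 then (cs, [], [])
  else (cs.take i.toNat, sep, cs.drop (i.toNat + sep.length))

lemma pvTailLenB (cs : List Char) (h : ¬ (pvPartition cs "else".toList).2.2 = []) :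
    (PySem.Chars.strip (pvPartition cs "else".toList).2.2).length < cs.length := by
  rw [pvPartition] at h ⊢
  simp only [show "else".toList = ['e', 'l', 's', 'e'] from rfl] at h ⊢
  by_cases hf : PySem.Chars.find cs ['e', 'l', 's', 'e'] = -1
  · simp [hf] at h
  · simp only [hf, if_false] at h ⊢
    simpa using pvDropStripLen cs ['e', 'l', 's', 'e'] (by decide) hf

def pvSplitB (cs sep : List Char) : List Char × List Char :=
  -- B's `value, condition = if_part.split(sep, 1)`; the fallback arm is Python's ValueError (outside Pre_)
  match PySem.Chars.splitOnMax cs sep 1 with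
  | [a, b] => (a, b)
  | _ => (cs, [])

def pvPrefixB : PySem.Dict String (List Char) :=
  -- B's PREFIX table {'if': '', 'elif': ELSE_TAG}
  PySem.Dict.ofList [("if", []), ("elif", "\\textsf{else~}".toList)]

def processIfBGo (cs : List Char) (ty : String) (pieces : List (List Char)) : List Char :=
  let p := pvPartition cs "else".toList
  let piece : List Char :=
    if ty = "else" then
      "\\textsf{else~}".toList ++ p.1 ++ "\\\\".toList
    else
      let vc := pvSplitB p.1 "if".toList
      -- PREFIX[type]: a missing key is Python's KeyError (outside Pre_); getD's default is that arm
      PySem.Dict.getD pvPrefixB ty [] ++ vc.1 ++ "\\hspace{0.5em}\\textsf{~if~}".toList ++ vc.2 ++ "\\\\".toList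
  let pieces2 := pieces ++ [piece]
  if _h : p.2.2 = [] then PySem.Chars.join [] pieces2
  else
    let t := PySem.Chars.strip p.2.2
    processIfBGo t (if PySem.Chars.isIn "~if~".toList t then "elif" else "else") pieces2
termination_by cs.length
decreasing_by
  exact pvTailLenB cs _h

def process_if_alt (text : String) (type : String) : String :=
  String.ofList (processIfBGo text.toList type [])

-- ===== PRECONDITION & SPEC =====
-- Pre_ excludes exactly the inputs where the Python A raises: a `type` other than
-- 'if'/'elif'/'else' (UnboundLocalError), and conditional chains in which a segment that
-- is processed as if/elif contains no 'if' to split on (ValueError from `split('if', 1)`).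
def Pre_process_if (text : String) (type : String) : Prop :=
  (type = "if" ∨ type = "elif" ∨ type = "else") ∧
  ((type = "if" ∨ type = "elif") →
    PySem.Chars.isIn "if".toList (PySem.Chars.splitOn text.toList "else".toList).headI = true) ∧
  (∀ k, k < (PySem.Chars.splitOn text.toList "else".toList).length → 1 ≤ k →
      (∃ j, j < (PySem.Chars.splitOn text.toList "else".toList).length ∧ k ≤ j ∧
        PySem.Chars.isIn "~if~".toList ((PySem.Chars.splitOn text.toList "else".toList).getD j []) = true) →
      PySem.Chars.isIn "if".toList ((PySem.Chars.splitOn text.toList "else".toList).getD k []) = true)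
instance (text : String) (type : String) : Decidable (Pre_process_if text type) := by
  unfold Pre_process_if; infer_instance

def pvWitness_process_if : String × String := ("x = 1 ~if~ a > 0 else 2", "if")

def Spec_process_if (text : String) (type : String) (out : String) : Prop := out = process_if_alt text type
instance (text : String) (type : String) (out : String) : Decidable (Spec_process_if text type out) := by unfold Spec_process_if; infer_instance

-- ===== CLAIM (what is proved, stated in full; the proofs are below) =====
def Claim_equal_process_if : Prop := ∀ (text : String) (type : String), Dom_process_if text type → Pre_process_if text type → Spec_process_if text type (process_if text type)

-- ===== LEMMAS AND PROOFS =====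
lemma pvPartEq (cs sep : List Char) (hs : sep ≠ []) :
    ((pvPartition cs sep).1, (pvPartition cs sep).2.2) = pvSplit1A cs sep := by
  rw [pvPartition, pvSplit1A, pvSplitOnMaxOne cs sep hs]
  by_cases hf : PySem.Chars.find cs sep = -1 <;> simp [hf]

lemma pvPartElse (cs : List Char) :
    ((pvPartition cs "else".toList).1, (pvPartition cs "else".toList).2.2) = pvElsePair cs := by
  rw [pvElsePair]
  by_cases hi : PySem.Chars.isIn "else".toList cs = true
  · rw [if_pos hi]; exact pvPartEq cs _ (by decide)
  · have hf : PySem.Chars.find cs "else".toList = -1 :=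
      (PySem.Chars.find_eq_neg_one_iff cs "else".toList).mpr
        (fun hinf => hi ((PySem.Chars.isIn_iff_infix "else".toList cs).mpr hinf))
    rw [if_neg hi, pvPartition]
    simp only [show "else".toList = ['e', 'l', 's', 'e'] from rfl] at hf ⊢
    simp [hf]

lemma pvJoinNil (l : List (List Char)) : PySem.Chars.join [] l = l.flatten := by
  induction l with
  | nil => simp [PySem.Chars.join, List.intercalate]
  | cons a t ih =>
      cases t with
      | nil => simp [PySem.Chars.join, List.intercalate]
      | cons b t' =>
          simp [PySem.Chars.join, List.intercalate] at ih ⊢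
          simpa using ih

lemma pvSplitsEq : pvSplitB = pvSplit1A := rfl

lemma pvPrefB_if : PySem.Dict.getD pvPrefixB "if" [] = [] := rfl

lemma pvPrefB_elif : PySem.Dict.getD pvPrefixB "elif" [] = "\\textsf{else~}".toList := rfl

lemma pvMain : ∀ (n : ℕ) (cs : List Char) (ty : String) (pieces : List (List Char)), cs.length < n →
    (ty = "if" ∨ ty = "elif" ∨ ty = "else") →
    processIfBGo cs ty pieces = PySem.Chars.join [] pieces ++ processIfA cs ty := by
  intro n
  induction n with
  | zero => intro cs ty pieces h; omega
  | succ n ih =>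
      intro cs ty pieces h hty
      rw [processIfBGo, processIfA]
      have hp := pvPartElse cs
      have h1 : (pvPartition cs "else".toList).1 = (pvElsePair cs).1 := by
        rw [← hp]
      have h2 : (pvPartition cs "else".toList).2.2 = (pvElsePair cs).2 := by
        rw [← hp]
      simp only [h1, h2]
      by_cases hz : (pvElsePair cs).2 = []
      · rw [dif_pos hz, dif_neg (by simpa using hz), pvJoinNil, pvJoinNil]
        rcases hty with t | t | t <;> simp [t, pvSplitsEq, pvPrefB_if, pvPrefB_elif]
      · rw [dif_neg hz, dif_pos (by simpa using hz)]
        have hlt : (PySem.Chars.strip (pvElsePair cs).2).length < n := by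
          have := pvTailLenA cs (by simpa using hz)
          omega
        rw [ih _ _ _ hlt (by split <;> simp)]
        rw [pvJoinNil, pvJoinNil]
        rcases hty with t | t | t <;> simp [t, pvSplitsEq, pvPrefB_if, pvPrefB_elif]

-- ===== VERDICT (by name: the statement is the Claim_ definition above) =====
theorem process_if_spec : Claim_equal_process_if := by
  intro text type _ hpre
  unfold Spec_process_if process_if process_if_alt
  rw [pvMain (text.toList.length + 1) text.toList type [] (by omega) hpre.1]
  simp
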